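-- pv_equiv track=rewrite | github.com/raf4lb/SimpleStackMachine | compiler.py | string_to_int8_list
-- ===== SOURCE A (Python) =====
-- def string_to_int8_list(string_int, list_size):
--     int_val = int(string_int)
--     num_bytes = list_size * 8
--     # Masking to ensure only the required number of bits are retained
--     int_val &= (1 << num_bytes) - 1
--     # Create the list of signed 8-bit integers
--     int8_list = []
--     for i in range(list_size):
--         byte_val = (int_val >> (i * 8)) & 0xFF
--         # Convert to signed 8-bit integer if necessary
--         if byte_val & 0x80:  # If the most significant bit is set
--             byte_val -= 0x100
--         int8_list.append(byte_val)
--     # int8_list.reverse()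
--     return int8_list
-- ===== SOURCE B (Python) =====
-- def string_to_int8_list(string_int, list_size):
--     val = int(string_int) & ((1 << (8 * list_size)) - 1)
--     raw = val.to_bytes(list_size, 'little')
--     return [b - 256 if b >= 128 else b for b in raw]
-- ===== Notes on version B (the rewrite author's own statement) =====
-- stated objective: idiomatic
-- what changed: B serializes the masked value once with int.to_bytes(list_size,'little') and decodes the resulting byte string with a sign-adjusting comprehension, replacing A's per-index shift/mask/sign-correction loop.
import Mathlib
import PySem

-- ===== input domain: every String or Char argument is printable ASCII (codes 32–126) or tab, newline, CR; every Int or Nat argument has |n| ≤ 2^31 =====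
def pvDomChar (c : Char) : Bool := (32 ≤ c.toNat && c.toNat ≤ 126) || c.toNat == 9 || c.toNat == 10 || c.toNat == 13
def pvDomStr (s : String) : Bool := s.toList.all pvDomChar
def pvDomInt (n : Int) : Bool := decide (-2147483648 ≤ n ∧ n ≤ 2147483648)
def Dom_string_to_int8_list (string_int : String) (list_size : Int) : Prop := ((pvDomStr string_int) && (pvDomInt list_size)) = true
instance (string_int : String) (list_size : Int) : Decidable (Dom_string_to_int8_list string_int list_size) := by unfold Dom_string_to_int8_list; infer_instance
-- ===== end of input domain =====

-- B replaces A's per-index shift/mask/sign-correction loop by one little-endian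
-- serialization (repeated divmod by 256, = int.to_bytes) followed by a sign-adjusting map.

-- ===== PORT A =====
-- int(string_int) raises ValueError when ofStr? = none, and 1 << (8*list_size)
-- raises for list_size < 0; both are excluded by Pre_, so the fallbacks below are unreachable there.
def string_to_int8_list (string_int : String) (list_size : Int) : List Int :=
  match PySem.Int.ofStr? string_int with
  | none => []
  | some intVal0 =>
    let numBytes := list_size * 8
    -- .toNat is exact under Pre_ (0 ≤ list_size); Python raises on a negative shift count
    let intVal := PySem.Int.band intVal0 ((1 <<< numBytes.toNat) - 1)
    (PySem.List.pyRange 0 list_size 1).foldl (fun acc i =>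
      let byteVal := PySem.Int.band (intVal >>> (i * 8).toNat) 255
      acc ++ [if PySem.Int.band byteVal 128 ≠ 0 then byteVal - 256 else byteVal]) []

-- ===== PORT B =====
-- val.to_bytes(list_size, 'little'): little-endian bytes by repeated divmod by 256
def pvToBytesLE : Nat → Int → List Int
  | 0, _ => []
  | k + 1, v => PySem.Int.mod v 256 :: pvToBytesLE k (PySem.Int.floordiv v 256)

def string_to_int8_list_alt (string_int : String) (list_size : Int) : List Int :=
  match PySem.Int.ofStr? string_int with
  | none => []
  | some n =>
    let val := PySem.Int.band n ((1 <<< (8 * list_size).toNat) - 1)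
    (pvToBytesLE list_size.toNat val).map (fun b => if b ≥ 128 then b - 256 else b)

-- ===== PRECONDITION & SPEC =====
-- Pre_: int(string_int) parses (else both raise ValueError) and list_size ≥ 0
-- (else A's '1 << (8*list_size)' raises ValueError).
def Pre_string_to_int8_list (string_int : String) (list_size : Int) : Prop :=
  (PySem.Int.ofStr? string_int).isSome = true ∧ 0 ≤ list_size
instance (string_int : String) (list_size : Int) : Decidable (Pre_string_to_int8_list string_int list_size) := by unfold Pre_string_to_int8_list; infer_instance

def pvWitness_string_to_int8_list : String × Int := ("-300", 3)

def Spec_string_to_int8_list (string_int : String) (list_size : Int) (out : List Int) : Prop := out = string_to_int8_list_alt string_int list_size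
instance (string_int : String) (list_size : Int) (out : List Int) : Decidable (Spec_string_to_int8_list string_int list_size out) := by unfold Spec_string_to_int8_list; infer_instance

-- ===== CLAIM (what is proved, stated in full; the proofs are below) =====
def Claim_equal_string_to_int8_list : Prop := ∀ (string_int : String) (list_size : Int), Dom_string_to_int8_list string_int list_size → Pre_string_to_int8_list string_int list_size → Spec_string_to_int8_list string_int list_size (string_to_int8_list string_int list_size)

-- ===== LEMMAS AND PROOFS =====

-- A's byte formula, at the Nat level
def pvAByte (v : Nat) (i : Nat) : Int :=
  let b : Int := ((v >>> (8 * i) : Nat) % 256 : Nat)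
  if PySem.Int.band b 128 ≠ 0 then b - 256 else b

lemma pvSign_eq (b : Int) (h0 : 0 ≤ b) (h1 : b < 256) :
    (if PySem.Int.band b 128 ≠ 0 then b - 256 else b) = (if b ≥ 128 then b - 256 else b) := by
  lift b to Nat using h0 with n
  have hn : n < 256 := by exact_mod_cast h1
  interval_cases n <;> decide

-- core induction: A's indexed extraction = B's repeated divmod, over Nat values
lemma pvModCast (v : Nat) : PySem.Int.mod (v : Int) 256 = ((v % 256 : Nat) : Int) := by
  exact_mod_cast PySem.Int.mod_natCast v 256

lemma pvDivCast (v : Nat) : PySem.Int.floordiv (v : Int) 256 = ((v / 256 : Nat) : Int) := by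
  exact_mod_cast PySem.Int.floordiv_natCast v 256

lemma pvAByte_zero (v : Nat) :
    pvAByte v 0 = (if ((v % 256 : Nat) : Int) ≥ 128 then ((v % 256 : Nat) : Int) - 256 else ((v % 256 : Nat) : Int)) := by
  unfold pvAByte
  simp only [Nat.mul_zero, Nat.shiftRight_zero]
  exact pvSign_eq _ (by positivity) (by exact_mod_cast Nat.mod_lt v (by norm_num))

lemma pvAByte_succ (v i : Nat) : pvAByte v (i + 1) = pvAByte (v / 256) i := by
  unfold pvAByte
  have : 8 * (i + 1) = 8 + 8 * i := by ring
  rw [this, Nat.shiftRight_add, Nat.shiftRight_eq_div_pow v 8]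

lemma pvCore (k : Nat) (v : Nat) :
    (List.range k).map (pvAByte v) =
      (pvToBytesLE k (v : Int)).map (fun b => if b ≥ 128 then b - 256 else b) := by
  induction k generalizing v with
  | zero => rfl
  | succ n ih =>
    rw [List.range_succ_eq_map, pvToBytesLE, pvModCast, pvDivCast]
    simp only [List.map_cons, List.map_map]
    refine congrArg₂ _ (pvAByte_zero v) ?_
    rw [← ih (v / 256)]
    exact List.map_congr_left (fun i _ => pvAByte_succ v i)

lemma pvFoldl_append_map {α β : Type} (l : List α) (f : α → β) (acc : List β) :
    l.foldl (fun acc i => acc ++ [f i]) acc = acc ++ l.map f := by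
  induction l generalizing acc with
  | nil => simp
  | cons x xs ih => simp [ih]

-- ===== VERDICT =====
theorem string_to_int8_list_spec : Claim_equal_string_to_int8_list := by
  intro s k _hdom hpre
  obtain ⟨hsome, hk⟩ := hpre
  unfold Spec_string_to_int8_list string_to_int8_list string_to_int8_list_alt
  obtain ⟨v0, hv0⟩ := Option.isSome_iff_exists.mp hsome
  rw [hv0]
  simp only [mul_comm k 8]
  set m := PySem.Int.band v0 (((1 <<< (8 * k).toNat : Nat) : Int) - 1) with hm
  have hmnn : 0 ≤ m := by
    rw [hm, PySem.Int.band_comm]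
    refine PySem.Int.band_nonneg_of_nonneg_left v0 ?_
    have : 1 ≤ (1 <<< (8 * k).toNat : Nat) := by
      rw [Nat.one_shiftLeft]; exact Nat.one_le_two_pow
    omega
  obtain ⟨mn, hmn⟩ := Int.eq_ofNat_of_zero_le hmnn
  rw [pvFoldl_append_map, List.nil_append, PySem.List.pyRange_one, List.map_map, hmn]
  have step : ∀ j : Nat,
      (fun i : Int =>
        let byteVal := PySem.Int.band (((mn : Int)) >>> (i * 8)) 255
        if PySem.Int.band byteVal 128 ≠ 0 then byteVal - 256 else byteVal) ((0 : Int) + j)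
      = pvAByte mn j := by
    intro j
    have h2 : ((mn : Int)) >>> (((0 : Int) + j) * 8) = ((mn >>> (8 * j) : Nat) : Int) := by
      rw [zero_add, show ((j : Int) * 8) = ((8 * j : Nat) : Int) by push_cast; ring]
      exact Int.shiftRight_natCast mn (8 * j)
    have h3 : PySem.Int.band ((mn >>> (8 * j) : Nat) : Int) 255
        = (((mn >>> (8 * j)) % 256 : Nat) : Int) := by
      rw [show (255 : Int) = ((255 : Nat) : Int) by norm_num, PySem.Int.band_natCast]
      rw [show (255 : Nat) = 2 ^ 8 - 1 by norm_num, Nat.and_two_pow_sub_one_eq_mod]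
    simp only [h2, h3]
    rfl
  rw [Int.sub_zero]
  calc (List.range k.toNat).map _
      = (List.range k.toNat).map (pvAByte mn) := List.map_congr_left (fun j _ => step j)
    _ = _ := pvCore k.toNat mn
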